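-- pv_equiv track=rewrite | github.com/thejayhaykid/Python | COS120/LABS/LAB04/LAB04.py | encryptTranspose2
-- ===== SOURCE A (Python) =====
-- def encryptTranspose2(message):
--     firstChars=""
--     secondChars=""
--     thirdChars=""
--     fourthChars=""
--     for i in range(len(message)):
--         if i%4==0:
--             fourthChars=fourthChars+message[i]
--         elif (i-1)%4==0:
--             thirdChars=thirdChars+message[i]
--         elif i%2==0:
--             secondChars=secondChars+message[i]
--         else:
--             firstChars=firstChars+message[i]
--     encryptText=firstChars+secondChars+thirdChars+fourthChars
--     if (len(secondChars)<len(firstChars)):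
--         encryptText=encryptText+firstChars[-1]
--     elif len(thirdChars)<len(secondChars):
--         encryptText=encryptText+fistChars[-1]+secondChars[-1]
--     elif len(fourthChars)<len(thirdChars):
--         encryptText=encryptText+fistChars[-1]+secondChars[-1]+thirdChars[-1]
--     return encryptText
-- ===== SOURCE B (Python) =====
-- def encryptTranspose2(message):
--     result = ""
--     for r in (3, 2, 1, 0):
--         for i in range(r, len(message), 4):
--             result = result + message[i]
--     return result
-- ===== Notes on version B (the rewrite author's own statement) =====
-- stated objective: simpler
-- what changed: B builds the transposition directly with four strided passes (indices r, r+4, ... for r = 3,2,1,0) instead of A's single pass that branches on i%4 into four accumulator buckets, and drops A's dead length-comparison suffix (whose conditions are never true since bucket lengths are monotone).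
import Mathlib
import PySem

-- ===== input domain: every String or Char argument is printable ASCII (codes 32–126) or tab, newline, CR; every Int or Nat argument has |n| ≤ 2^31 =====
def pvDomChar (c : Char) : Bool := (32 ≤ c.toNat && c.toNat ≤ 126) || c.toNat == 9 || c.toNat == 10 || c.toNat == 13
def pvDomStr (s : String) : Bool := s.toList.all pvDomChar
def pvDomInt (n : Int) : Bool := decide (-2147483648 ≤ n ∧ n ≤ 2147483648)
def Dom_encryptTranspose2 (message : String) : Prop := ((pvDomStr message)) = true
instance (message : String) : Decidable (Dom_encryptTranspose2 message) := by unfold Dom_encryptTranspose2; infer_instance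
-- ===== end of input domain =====

-- B replaces A's one-pass bucket loop (branching on i%4 into four accumulators, plus a dead
-- length-comparison suffix) by four direct strided passes r, r+4, r+8, … for r = 3,2,1,0: simpler,
-- and the provably unreachable suffix code is gone.

-- ===== PORT A =====
-- A's for-loop over range(len(message)): structural recursion over the characters, carrying the
-- Python index i and the four bucket strings (as List Char) in the same order A updates them.
def encA_loop : List Char → Int → List Char → List Char → List Char → List Char →
    List Char × List Char × List Char × List Char
  | [], _, f, s, t, q => (f, s, t, q)
  | c :: rest, i, f, s, t, q =>
    if PySem.Int.mod i 4 = 0 then encA_loop rest (i + 1) f s t (q ++ [c])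
    else if PySem.Int.mod (i - 1) 4 = 0 then encA_loop rest (i + 1) f s (t ++ [c]) q
    else if PySem.Int.mod i 2 = 0 then encA_loop rest (i + 1) f (s ++ [c]) t q
    else encA_loop rest (i + 1) (f ++ [c]) s t q

def encryptTranspose2 (message : String) : String :=
  match encA_loop message.toList 0 [] [] [] [] with
  | (firstChars, secondChars, thirdChars, fourthChars) =>
    let encryptText := firstChars ++ secondChars ++ thirdChars ++ fourthChars
    if secondChars.length < firstChars.length then
      -- firstChars[-1]; the condition forces firstChars ≠ [], so pyGet? is some here
      String.ofList (encryptText ++ (PySem.List.pyGet? firstChars (-1)).elim [] (fun c => [c]))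
    else if thirdChars.length < secondChars.length then
      -- Python reads the undefined name 'fistChars' here (NameError); the branch is unreachable
      -- (bucket lengths are monotone, proved below), ported as firstChars[-1] + secondChars[-1]
      String.ofList (encryptText ++ (PySem.List.pyGet? firstChars (-1)).elim [] (fun c => [c])
        ++ (PySem.List.pyGet? secondChars (-1)).elim [] (fun c => [c]))
    else if fourthChars.length < thirdChars.length then
      -- same undefined name in Python; unreachable, ported as the three last characters
      String.ofList (encryptText ++ (PySem.List.pyGet? firstChars (-1)).elim [] (fun c => [c])
        ++ (PySem.List.pyGet? secondChars (-1)).elim [] (fun c => [c])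
        ++ (PySem.List.pyGet? thirdChars (-1)).elim [] (fun c => [c]))
    else String.ofList encryptText

-- ===== PORT B =====
-- inner loop of B: for i in range(r, len(message), 4): result = result + message[i]
def encB_pass (cs : List Char) (r : Int) (acc : List Char) : List Char :=
  (PySem.List.pyRange r cs.length 4).foldl
    (fun res i => res ++ (PySem.List.pyGet? cs i).elim [] (fun c => [c])) acc

def encryptTranspose2_alt (message : String) : String :=
  String.ofList (([3, 2, 1, 0] : List Int).foldl (fun res r => encB_pass message.toList r res) [])

-- ===== PRECONDITION & SPEC =====
def Spec_encryptTranspose2 (message : String) (out : String) : Prop := out = encryptTranspose2_alt message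
instance (message : String) (out : String) : Decidable (Spec_encryptTranspose2 message out) := by unfold Spec_encryptTranspose2; infer_instance

-- ===== CLAIM (what is proved, stated in full; the proofs are below) =====
def Claim_equal_encryptTranspose2 : Prop := ∀ (message : String), Dom_encryptTranspose2 message → Spec_encryptTranspose2 message (encryptTranspose2 message)

-- ===== LEMMAS AND PROOFS =====

-- the characters of cs at positions k, k+4, k+8, …
def pick (cs : List Char) (k : Nat) : List Char :=
  if h : k < cs.length then cs[k] :: pick cs (k + 4) else []
  termination_by cs.length - k

-- the characters of cs whose Python index (starting at i) is ≡ r (mod 4)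
def sel : List Char → Int → Int → List Char
  | [], _, _ => []
  | c :: rest, i, r => (if i % 4 = r then [c] else []) ++ sel rest (i + 1) r

theorem pick_nil (k : Nat) : pick [] k = [] := by
  rw [pick]; simp

theorem pick_succ (c : Char) (rest : List Char) (k : Nat) :
    pick (c :: rest) (k + 1) = pick rest k := by
  fun_induction pick rest k with
  | case1 k h ih =>
    rw [pick]
    simp only [List.length_cons]
    rw [dif_pos (by omega)]
    simp [ih]
  | case2 k h =>
    rw [pick]
    rw [dif_neg (by simp; omega)]

theorem length_pick (cs : List Char) (k : Nat) :
    (pick cs k).length = (cs.length - k + 3) / 4 := by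
  fun_induction pick cs k with
  | case1 k h ih => simp only [List.length_cons, ih]; omega
  | case2 k h => simp only [List.length_nil]; omega

theorem sel_eq_pick (cs : List Char) : ∀ (i r : Int), 0 ≤ i → 0 ≤ r → r < 4 →
    sel cs i r = pick cs ((r - i) % 4).toNat := by
  induction cs with
  | nil => intro i r _ _ _; simp [sel, pick_nil]
  | cons c rest ih =>
    intro i r hi hr hr4
    simp only [sel]
    by_cases h : i % 4 = r
    · rw [if_pos h]
      have hm : ((r - i) % 4).toNat = 0 := by omega
      have hm' : ((r - (i + 1)) % 4).toNat = 3 := by omega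
      rw [hm, ih (i + 1) r (by omega) hr hr4, hm']
      have hp : pick (c :: rest) 0 = c :: pick rest 3 := by
        rw [pick, dif_pos (by simp), show (0 : Nat) + 4 = 3 + 1 from rfl, pick_succ]
        rfl
      rw [hp]
      rfl
    · rw [if_neg h]
      have hm : 1 ≤ ((r - i) % 4).toNat ∧ ((r - i) % 4).toNat ≤ 3 := by omega
      have hm' : ((r - (i + 1)) % 4).toNat = ((r - i) % 4).toNat - 1 := by omega
      rw [ih (i + 1) r (by omega) hr hr4, hm']
      have : ((r - i) % 4).toNat = (((r - i) % 4).toNat - 1) + 1 := by omega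
      rw [this, pick_succ]
      simp

-- A's loop appends exactly the four residue classes to the accumulators
theorem encA_loop_eq (cs : List Char) : ∀ (i : Int) (f s t q : List Char), 0 ≤ i →
    encA_loop cs i f s t q = (f ++ sel cs i 3, s ++ sel cs i 2, t ++ sel cs i 1, q ++ sel cs i 0) := by
  induction cs with
  | nil => intro i f s t q _; simp [encA_loop, sel]
  | cons c rest ih =>
    intro i f s t q hi
    simp only [encA_loop, sel,
      PySem.Int.mod_eq_emod_of_pos (a := i) (show (0:Int) < 4 by norm_num),
      PySem.Int.mod_eq_emod_of_pos (a := i - 1) (show (0:Int) < 4 by norm_num),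
      PySem.Int.mod_eq_emod_of_pos (a := i) (show (0:Int) < 2 by norm_num)]
    have h4 : i % 4 = 0 ∨ i % 4 = 1 ∨ i % 4 = 2 ∨ i % 4 = 3 := by omega
    rcases h4 with h | h | h | h
    · rw [if_pos h, ih (i + 1) _ _ _ _ (by omega)]
      rw [if_neg (by omega), if_neg (by omega), if_neg (by omega), if_pos h]
      simp
    · rw [if_neg (by omega), if_pos (by omega), ih (i + 1) _ _ _ _ (by omega)]
      rw [if_neg (by omega), if_neg (by omega), if_pos h, if_neg (by omega)]
      simp
    · rw [if_neg (by omega), if_neg (by omega), if_pos (by omega),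
        ih (i + 1) _ _ _ _ (by omega)]
      rw [if_neg (by omega), if_pos h, if_neg (by omega), if_neg (by omega)]
      simp
    · rw [if_neg (by omega), if_neg (by omega), if_neg (by omega),
        ih (i + 1) _ _ _ _ (by omega)]
      rw [if_pos h, if_neg (by omega), if_neg (by omega), if_neg (by omega)]
      simp

-- pyRange with step 4 peels its first element
theorem pyRange4_cons (a b : Int) (h : a < b) :
    PySem.List.pyRange a b 4 = a :: PySem.List.pyRange (a + 4) b 4 := by
  rw [PySem.List.pyRange_of_pos a b (by norm_num),
    PySem.List.pyRange_of_pos (a + 4) b (by norm_num)]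
  have hc : ((b - a + 4 - 1) / 4).toNat =
      (if a + 4 < b then ((b - (a + 4) + 4 - 1) / 4).toNat else 0) + 1 := by
    split_ifs with h' <;> omega
  rw [if_pos h, hc, List.range_succ_eq_map]
  simp only [List.map_cons, List.map_map]
  congr 1
  · simp
  · exact List.map_congr_left (fun k _ => by simp [Function.comp]; ring)

theorem pyRange4_nil (a b : Int) (h : b ≤ a) : PySem.List.pyRange a b 4 = [] := by
  rw [PySem.List.pyRange_of_pos a b (by norm_num), if_neg (by omega)]
  simp

-- B's inner pass appends exactly pick cs k
theorem encB_pass_eq (cs : List Char) (k : Nat) :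
    ∀ acc : List Char, encB_pass cs (k : Int) acc = acc ++ pick cs k := by
  fun_induction pick cs k with
  | case1 k h ih =>
    intro acc
    unfold encB_pass
    rw [pyRange4_cons _ _ (by exact_mod_cast h)]
    simp only [List.foldl_cons]
    have hg : PySem.List.pyGet? cs (k : Int) = some cs[k] := by
      rw [PySem.List.pyGet?_natCast]
      simp [List.getElem?_eq_getElem h]
    rw [hg, show ((k : Int) + 4) = ((k + 4 : Nat) : Int) by push_cast; ring]
    simp only [Option.elim_some]
    have hrec := ih (acc ++ [cs[k]])
    unfold encB_pass at hrec
    rw [hrec]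
    simp
  | case2 k h =>
    intro acc
    unfold encB_pass
    rw [pyRange4_nil _ _ (by simpa using Nat.le_of_not_lt h)]
    simp

-- ===== VERDICT (by name: the statement is the Claim_ definition above) =====
theorem encryptTranspose2_spec : Claim_equal_encryptTranspose2 := by
  intro message _
  unfold Spec_encryptTranspose2 encryptTranspose2 encryptTranspose2_alt
  set cs := message.toList with hcs
  have hA := encA_loop_eq cs 0 [] [] [] [] le_rfl
  have h3 : sel cs 0 3 = pick cs 3 := by rw [sel_eq_pick cs 0 3 le_rfl (by norm_num) (by norm_num)]; rfl
  have h2 : sel cs 0 2 = pick cs 2 := by rw [sel_eq_pick cs 0 2 le_rfl (by norm_num) (by norm_num)]; rfl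
  have h1 : sel cs 0 1 = pick cs 1 := by rw [sel_eq_pick cs 0 1 le_rfl (by norm_num) (by norm_num)]; rfl
  have h0 : sel cs 0 0 = pick cs 0 := by rw [sel_eq_pick cs 0 0 le_rfl (by norm_num) (by norm_num)]; rfl
  rw [hA]
  simp only [List.nil_append, h3, h2, h1, h0]
  -- the three suffix branches of A are unreachable: bucket lengths are monotone
  rw [if_neg (by rw [length_pick, length_pick]; omega),
    if_neg (by rw [length_pick, length_pick]; omega),
    if_neg (by rw [length_pick, length_pick]; omega)]
  -- B: four strided passes
  simp only [List.foldl_cons, List.foldl_nil]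
  rw [show (3 : Int) = ((3 : Nat) : Int) by norm_num, encB_pass_eq,
    show (2 : Int) = ((2 : Nat) : Int) by norm_num, encB_pass_eq,
    show (1 : Int) = ((1 : Nat) : Int) by norm_num, encB_pass_eq,
    show (0 : Int) = ((0 : Nat) : Int) by norm_num, encB_pass_eq]
  simp [List.append_assoc]
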